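-- pv_equiv track=rewrite | github.com/serenomoon/UTN---TUP | Programacion/Ejercicios/7-Guia Ordenamientos/ordenamiento.py | ordenar_array_con_negativos
-- ===== SOURCE A (Python) =====
-- def ordenar_array_con_negativos(array: list) -> list:
--
--     for i in range(len(array)-1):
--         for j in range(i+1,len(array)):
--             if array[i] > array[j]:
--                 auxiliar = array[i]
--                 array[i] = array[j]
--                 array[j] = auxiliar
--
--     cantidad_negativos = 0
--     for i in range(len(array)):
--         if array[i] < 0:
--             cantidad_negativos += 1
--
--     for i in range(cantidad_negativos//2):
--         auxiliar = array[i]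
--         array[i] = array[cantidad_negativos-1-i]
--         array[cantidad_negativos-1-i] = auxiliar
--
--     return array
-- ===== SOURCE B (Python) =====
-- def ordenar_array_con_negativos(array: list) -> list:
--     neg = sorted((x for x in array if x < 0), reverse=True)
--     nonneg = sorted(x for x in array if x >= 0)
--     array[:] = neg + nonneg
--     return array
-- ===== Notes on version B (the rewrite author's own statement) =====
-- stated objective: simpler
-- what changed: Replaces the hand-written quadratic exchange sort plus negative-count and prefix-reversal swap loop by two sign-filtered library sorts (negatives descending, non-negatives ascending) concatenated and slice-assigned in place.
import Mathlib
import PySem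

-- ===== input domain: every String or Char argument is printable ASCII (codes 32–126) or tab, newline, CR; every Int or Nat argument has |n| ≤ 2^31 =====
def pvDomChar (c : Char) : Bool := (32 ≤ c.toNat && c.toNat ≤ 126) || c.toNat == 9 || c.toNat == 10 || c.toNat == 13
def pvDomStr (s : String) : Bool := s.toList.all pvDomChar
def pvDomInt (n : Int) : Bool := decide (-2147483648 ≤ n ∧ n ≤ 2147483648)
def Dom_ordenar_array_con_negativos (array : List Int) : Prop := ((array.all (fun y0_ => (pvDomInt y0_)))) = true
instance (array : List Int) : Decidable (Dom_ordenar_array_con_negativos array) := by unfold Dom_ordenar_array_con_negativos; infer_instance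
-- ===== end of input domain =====

-- B replaces A's hand-written exchange sort + count + prefix-reversal swap loop by two
-- sign-filtered sorts concatenated (simpler; both A and B mutate the argument in place in
-- Python and return the same object — the equivalence proved here is about the return value).

-- ===== PORT A =====
-- inner loop 'for j in range(i+1, len)': carries the current value at position i and the
-- suffix, swapping whenever array[i] > array[j]
def pvInner (x : Int) (ys : List Int) : Int × List Int :=
  match ys with
  | [] => (x, [])
  | y :: t =>
    if x > y then
      let r := pvInner y t
      (r.1, x :: r.2)
    else
      let r := pvInner x t
      (r.1, y :: r.2)

theorem pvInner_length (x : Int) (ys : List Int) : (pvInner x ys).2.length = ys.length := by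
  induction ys generalizing x with
  | nil => rfl
  | cons y t ih =>
    simp only [pvInner]
    split <;> simp [ih]

-- outer loop 'for i in range(len-1)'
def pvSortA (l : List Int) : List Int :=
  match l with
  | [] => []
  | x :: xs =>
    let r := pvInner x xs
    r.1 :: pvSortA r.2
termination_by l.length
decreasing_by simp [pvInner_length]

-- 'cantidad_negativos' counting loop
def pvCountNeg (l : List Int) : Nat :=
  l.foldl (fun c x => if x < 0 then c + 1 else c) 0

-- one swap of the reversal loop: auxiliar = a[i]; a[i] = a[k-1-i]; a[k-1-i] = auxiliar
def pvSwap (k : Nat) (a : List Int) (i : Nat) : List Int :=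
  let aux := a.getD i 0
  (a.set i (a.getD (k - 1 - i) 0)).set (k - 1 - i) aux

-- 'for i in range(cantidad_negativos//2)'
def pvRevLoop (a : List Int) (k : Nat) : List Int :=
  (List.range (k / 2)).foldl (pvSwap k) a

def ordenar_array_con_negativos (array : List Int) : List Int :=
  let s := pvSortA array
  let k := pvCountNeg s
  pvRevLoop s k

-- ===== PORT B =====
def ordenar_array_con_negativos_alt (array : List Int) : List Int :=
  let neg := PySem.List.sorted (array.filter (fun x => decide (x < 0))) (fun x => x) true
  let nonneg := PySem.List.sorted (array.filter (fun x => decide (0 ≤ x))) (fun x => x) false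
  neg ++ nonneg

-- ===== PRECONDITION & SPEC =====
def Spec_ordenar_array_con_negativos (array : List Int) (out : List Int) : Prop := out = ordenar_array_con_negativos_alt array
instance (array : List Int) (out : List Int) : Decidable (Spec_ordenar_array_con_negativos array out) := by unfold Spec_ordenar_array_con_negativos; infer_instance

-- ===== CLAIM (what is proved, stated in full; the proofs are below) =====
def Claim_equal_ordenar_array_con_negativos : Prop := ∀ (array : List Int), Dom_ordenar_array_con_negativos array → Spec_ordenar_array_con_negativos array (ordenar_array_con_negativos array)

-- ===== LEMMAS AND PROOFS =====

theorem pvInner_perm (x : Int) (ys : List Int) :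
    ((pvInner x ys).1 :: (pvInner x ys).2).Perm (x :: ys) := by
  induction ys generalizing x with
  | nil => rfl
  | cons y t ih =>
    by_cases h : x > y
    · simp only [pvInner, if_pos h]
      exact (List.Perm.swap x _ _).trans (List.Perm.cons x (ih y))
    · simp only [pvInner, if_neg h]
      exact ((List.Perm.swap y _ _).trans (List.Perm.cons y (ih x))).trans (List.Perm.swap x y t)

theorem pvInner_min (x : Int) (ys : List Int) :
    ∀ z ∈ x :: ys, (pvInner x ys).1 ≤ z := by
  induction ys generalizing x with
  | nil =>
    intro z hz
    simp only [List.mem_singleton] at hz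
    simp [pvInner, hz]
  | cons y t ih =>
    intro z hz
    by_cases h : x > y
    · simp only [pvInner, if_pos h]
      rcases List.mem_cons.1 hz with rfl | hz'
      · exact le_of_lt (lt_of_le_of_lt (ih y y (List.mem_cons_self)) h)
      · exact ih y z hz'
    · simp only [pvInner, if_neg h]
      rcases List.mem_cons.1 hz with rfl | hz'
      · exact ih _ _ List.mem_cons_self
      · rcases List.mem_cons.1 hz' with rfl | hz''
        · exact le_trans (ih x x List.mem_cons_self) (not_lt.1 h)
        · exact ih x z (List.mem_cons_of_mem _ hz'')

theorem pvSortA_perm (l : List Int) : (pvSortA l).Perm l := by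
  fun_induction pvSortA with
  | case1 => rfl
  | case2 x xs r ih =>
    exact (List.Perm.cons r.1 ih).trans (pvInner_perm x xs)

theorem pvSortA_pairwise (l : List Int) : (pvSortA l).Pairwise (· ≤ ·) := by
  fun_induction pvSortA with
  | case1 => exact List.Pairwise.nil
  | case2 x xs r ih =>
    refine List.pairwise_cons.2 ⟨?_, ih⟩
    intro z hz
    have hz2 : z ∈ r.2 := (pvSortA_perm r.2).mem_iff.1 hz
    have hzx : z ∈ x :: xs := (pvInner_perm x xs).mem_iff.1 (List.mem_cons_of_mem _ hz2)
    exact pvInner_min x xs z hzx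

theorem pvCountNeg_aux (l : List Int) (c : Nat) :
    l.foldl (fun c x => if x < 0 then c + 1 else c) c
      = c + (l.filter (fun x => decide (x < 0))).length := by
  induction l generalizing c with
  | nil => simp
  | cons a t ih =>
    by_cases h : a < 0 <;> simp [List.filter_cons, h, ih] <;> omega

theorem pvCountNeg_eq (l : List Int) :
    pvCountNeg l = (l.filter (fun x => decide (x < 0))).length := by
  simpa using pvCountNeg_aux l 0

theorem pvSwap_shift (k' i : Nat) (h1 : 1 ≤ k') (h2 : i ≤ k' - 1) (h : Int) (t : List Int) :
    pvSwap (k' + 2) (h :: t) (i + 1) = h :: pvSwap k' t i := by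
  have e1 : k' + 2 - 1 - (i + 1) = (k' - 1 - i) + 1 := by omega
  simp only [pvSwap, e1, List.getD_cons_succ, List.set_cons_succ]

theorem pvFold_shift (k' : Nat) (m : Nat) (hm : m ≤ k') (t : List Int) (h : Int) :
    (List.range' 1 m).foldl (pvSwap (k' + 2)) (h :: t)
      = h :: (List.range m).foldl (pvSwap k') t := by
  induction m with
  | zero => simp
  | succ m ih =>
    have hm'' : m ≤ k' := by omega
    rw [List.range'_eq_map_range, List.foldl_map] at ih ⊢
    rw [List.range_succ, List.foldl_append, List.foldl_append, ih (by omega)]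
    simp only [List.foldl_cons, List.foldl_nil]
    rw [show 1 + m = m + 1 from by omega]
    exact pvSwap_shift k' m (by omega) (by omega) h _

theorem pvRevLoop_eq (k : Nat) : ∀ (a : List Int), k ≤ a.length →
    pvRevLoop a k = (a.take k).reverse ++ a.drop k := by
  induction k using Nat.strong_induction_on with
  | _ k ih =>
    match k with
    | 0 => intro a _; simp [pvRevLoop]
    | 1 =>
      intro a h
      cases a with
      | nil => simp at h
      | cons x xs => simp [pvRevLoop]
    | (k' + 2) =>
      intro a h
      cases a with
      | nil => simp at h
      | cons x xs =>
        have hlen : k' + 1 ≤ xs.length := by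
          simp only [List.length_cons] at h; omega
        have hk'lt : k' < xs.length := by omega
        -- the first swap
        have hsplit : List.range ((k' + 2) / 2) = 0 :: List.range' 1 (k' / 2) := by
          have : (k' + 2) / 2 = k' / 2 + 1 := by omega
          rw [this, List.range_eq_range', List.range'_succ]
        have hstep : pvSwap (k' + 2) (x :: xs) 0 = xs.getD k' 0 :: xs.set k' x := by
          have e : k' + 2 - 1 = k' + 1 := rfl
          simp only [pvSwap, e, Nat.sub_zero, List.getD_cons_zero,
            List.getD_cons_succ, List.set_cons_zero, List.set_cons_succ]
        have hfold := pvFold_shift k' (k' / 2) (by omega) (xs.set k' x) (xs.getD k' 0)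
        have hih := ih k' (by omega) (xs.set k' x) (by simpa using le_of_lt hk'lt)
        have hset : xs.set k' x = xs.take k' ++ x :: xs.drop (k' + 1) :=
          List.set_eq_take_cons_drop x hk'lt
        have htk : (xs.set k' x).take k' = xs.take k' := by
          rw [hset]
          rw [List.take_append_of_le_length (by simp [List.length_take]; omega)]
          simp [List.take_take]
        have hdk : (xs.set k' x).drop k' = x :: xs.drop (k' + 1) := by
          rw [hset]
          rw [List.drop_append_of_le_length (by simp [List.length_take]; omega)]
          simp [List.length_take, Nat.min_eq_left (le_of_lt hk'lt)]
        have htake : xs.take (k' + 1) = xs.take k' ++ [xs.getD k' 0] := by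
          rw [List.getD_eq_getElem _ _ hk'lt]
          exact List.take_succ_eq_append_getElem hk'lt
        calc pvRevLoop (x :: xs) (k' + 2)
            = (0 :: List.range' 1 (k' / 2)).foldl (pvSwap (k' + 2)) (x :: xs) := by
              rw [pvRevLoop, hsplit]
          _ = (List.range' 1 (k' / 2)).foldl (pvSwap (k' + 2)) (xs.getD k' 0 :: xs.set k' x) := by
              rw [List.foldl_cons, hstep]
          _ = xs.getD k' 0 :: pvRevLoop (xs.set k' x) k' := by rw [hfold]; rfl
          _ = xs.getD k' 0 :: ((xs.take k').reverse ++ x :: xs.drop (k' + 1)) := by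
              rw [hih, htk, hdk]
          _ = ((x :: xs).take (k' + 2)).reverse ++ (x :: xs).drop (k' + 2) := by
              simp [htake, List.reverse_append]

-- uniqueness of an ascending arrangement
theorem pvSortedUnique (l1 l2 : List Int) (hp : l1.Perm l2)
    (h1 : l1.Pairwise (· ≤ ·)) (h2 : l2.Pairwise (· ≤ ·)) : l1 = l2 :=
  List.Perm.eq_of_pairwise (fun _ _ _ _ hab hba => le_antisymm hab hba) h1 h2 hp

theorem pvSortedUniqueGe (l1 l2 : List Int) (hp : l1.Perm l2)
    (h1 : l1.Pairwise (fun a b => b ≤ a)) (h2 : l2.Pairwise (fun a b => b ≤ a)) : l1 = l2 :=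
  List.Perm.eq_of_pairwise (fun _ _ _ _ hab hba => le_antisymm hba hab) h1 h2 hp

-- ===== VERDICT (by name: the statement is the Claim_ definition above) =====
theorem ordenar_array_con_negativos_spec : Claim_equal_ordenar_array_con_negativos := by
  intro a _
  unfold Spec_ordenar_array_con_negativos ordenar_array_con_negativos ordenar_array_con_negativos_alt
  set F := a.filter (fun x => decide (x < 0)) with hF
  set G := a.filter (fun x => decide (0 ≤ x)) with hG
  set NA := PySem.List.sorted F (fun x => x) false with hNA
  set P := PySem.List.sorted G (fun x => x) false with hP
  have hmemNA : ∀ z ∈ NA, z < 0 := by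
    intro z hz
    have := (PySem.List.mem_sorted _ _ _ _).1 hz
    simpa using (List.mem_filter.1 this).2
  have hmemP : ∀ z ∈ P, 0 ≤ z := by
    intro z hz
    have := (PySem.List.mem_sorted _ _ _ _).1 hz
    simpa using (List.mem_filter.1 this).2
  -- step 1: the exchange sort produces NA ++ P
  have hperm : (NA ++ P).Perm a := by
    have h1 : (NA ++ P).Perm (F ++ G) :=
      List.Perm.append (PySem.List.sorted_perm _ _ _) (PySem.List.sorted_perm _ _ _)
    have h2 : (F ++ G).Perm a := by
      have hcongr : G = a.filter (fun x => !decide (x < 0)) := by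
        apply List.filter_congr
        intro x _
        by_cases hx : x < 0 <;> simp [hx] <;> omega
      rw [hF, hcongr]
      exact List.filter_append_perm _ a
    exact h1.trans h2
  have hpairNA : NA.Pairwise (· ≤ ·) := by
    have := PySem.List.sorted_pairwise (xs := F) (key := fun x => x)
    simpa using this
  have hpairP : P.Pairwise (· ≤ ·) := by
    have := PySem.List.sorted_pairwise (xs := G) (key := fun x => x)
    simpa using this
  have hpair : (NA ++ P).Pairwise (· ≤ ·) := by
    refine List.pairwise_append.2 ⟨hpairNA, hpairP, ?_⟩
    intro u hu v hv
    exact le_trans (le_of_lt (hmemNA u hu)) (hmemP v hv)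
  have hS : pvSortA a = NA ++ P :=
    pvSortedUnique _ _ ((pvSortA_perm a).trans hperm.symm) (pvSortA_pairwise a) hpair
  -- step 2: the negative count is NA.length
  have hk : pvCountNeg (pvSortA a) = NA.length := by
    rw [pvCountNeg_eq, hS, List.filter_append]
    rw [List.filter_eq_self.2 (by intro z hz; simpa using hmemNA z hz)]
    rw [List.filter_eq_nil_iff.2 (by intro z hz; simpa using not_lt.2 (hmemP z hz))]
    simp
  -- step 3: the reversal loop reverses exactly NA
  have hrev : pvRevLoop (pvSortA a) (pvCountNeg (pvSortA a)) = NA.reverse ++ P := by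
    rw [hk, hS, pvRevLoop_eq NA.length (NA ++ P) (by simp)]
    rw [List.take_left, List.drop_left]
  -- step 4: NA.reverse is Python's descending sort of the negatives
  have hdesc : NA.reverse = PySem.List.sorted F (fun x => x) true := by
    apply pvSortedUniqueGe
    · exact (NA.reverse_perm.trans (PySem.List.sorted_perm _ _ _)).trans
        (PySem.List.sorted_perm _ _ _).symm
    · exact List.pairwise_reverse.2 hpairNA
    · have := PySem.List.sorted_pairwise_rev (xs := F) (key := fun x => x)
      simpa using this
  rw [hrev, hdesc]
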